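-- pv_equiv track=rewrite | github.com/ZombieCait/practice | ya.py | get_introvert_seat
-- ===== SOURCE A (Python) =====
-- def get_introvert_seat(seats):
--     prev = None
--     res = -1
--
--     for i in range(len(seats)):
--         if seats[i] == 1:
--             if prev == None:
--                 res = i
--             else:
--                 res = max(res, (i-prev) // 2)
--             prev = i
--     res = max(res, len(seats)-1-prev)
--     return res
-- ===== SOURCE B (Python) =====
-- def get_introvert_seat(seats):
--     left, right = [], []
--     d = None
--     for s in seats:
--         d = 0 if s == 1 else (None if d is None else d + 1)
--         left.append(d)
--     d = None
--     for s in reversed(seats):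
--         d = 0 if s == 1 else (None if d is None else d + 1)
--         right.append(d)
--     right.reverse()
--     return max(min(x for x in lr if x is not None) for lr in zip(left, right))
-- ===== Notes on version B (the rewrite author's own statement) =====
-- stated objective: alternative
-- what changed: Replaces A's fused prev/res gap scan with the two-sweep nearest-seat-distance algorithm: compute for every seat its distance to the closest occupied seat via a forward and a backward sweep, then return the maximum over all seats of the pointwise minimum of the two sweeps.
import Mathlib
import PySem

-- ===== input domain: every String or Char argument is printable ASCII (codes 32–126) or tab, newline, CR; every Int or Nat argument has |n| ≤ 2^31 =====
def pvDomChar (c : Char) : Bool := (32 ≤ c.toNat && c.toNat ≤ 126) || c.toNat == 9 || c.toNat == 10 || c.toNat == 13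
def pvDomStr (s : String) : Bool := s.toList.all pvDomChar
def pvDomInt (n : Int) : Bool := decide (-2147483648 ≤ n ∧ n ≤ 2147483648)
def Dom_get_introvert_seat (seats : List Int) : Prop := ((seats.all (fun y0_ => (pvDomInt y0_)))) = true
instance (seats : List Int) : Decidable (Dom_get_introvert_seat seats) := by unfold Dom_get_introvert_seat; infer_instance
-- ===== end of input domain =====

-- B replaces A's fused prev/res gap scan by a different algorithm: two sweeps computing, for
-- every seat, its distance to the nearest occupied seat from the left and from the right, and
-- returning the maximum over all seats of the pointwise minimum of the two sweeps.

-- ===== PORT A =====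
def get_introvert_seat (seats : List Int) : Int :=
  let st := (PySem.List.pyRange 0 (seats.length : Int) 1).foldl
    (fun (s : Option Int × Int) i =>
      if PySem.List.pyGetD seats i 0 = 1 then
        match s.1 with
        | none => (some i, i)
        | some p => (some i, max s.2 (PySem.Int.floordiv (i - p) 2))
      else s) (none, -1)
  match st.1 with
  | some p => max st.2 ((seats.length : Int) - 1 - p)
  | none => st.2   -- Python raises TypeError here (no seat equals 1); excluded by Pre_

-- ===== PORT B =====
def get_introvert_seat_alt (seats : List Int) : Int :=
  let left := (seats.foldl (fun (st : Option Int × List (Option Int)) (s : Int) =>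
      let d := if s = 1 then some (0:Int)
               else (match st.1 with | none => none | some x => some (x + 1))
      (d, st.2 ++ [d])) (none, [])).2
  let right := ((seats.reverse.foldl (fun (st : Option Int × List (Option Int)) (s : Int) =>
      let d := if s = 1 then some (0:Int)
               else (match st.1 with | none => none | some x => some (x + 1))
      (d, st.2 ++ [d])) (none, [])).2).reverse
  match (left.zip right).map (fun lr =>
      match ([lr.1, lr.2].filterMap id : List Int) with
      | [] => (0:Int)   -- Python: min() of an empty generator raises ValueError (nobody seated); excluded by Pre_
      | x :: xs => xs.foldl min x) with
  | [] => 0   -- Python: max() of an empty generator raises ValueError; excluded by Pre_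
  | x :: xs => xs.foldl max x

-- ===== PRECONDITION & SPEC =====
-- Pre_ excludes exactly the inputs with no seat equal to 1: there A raises TypeError
-- (None arithmetic) and B's answer would be meaningless sentinel arithmetic.
def Pre_get_introvert_seat (seats : List Int) : Prop := (1 : Int) ∈ seats
instance (seats : List Int) : Decidable (Pre_get_introvert_seat seats) := by unfold Pre_get_introvert_seat; infer_instance
def pvWitness_get_introvert_seat : List Int := [0, 1, 0, 0, 1]

def Spec_get_introvert_seat (seats : List Int) (out : Int) : Prop := out = get_introvert_seat_alt seats
instance (seats : List Int) (out : Int) : Decidable (Spec_get_introvert_seat seats out) := by unfold Spec_get_introvert_seat; infer_instance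

-- ===== CLAIM (what is proved, stated in full; the proofs are below) =====
def Claim_equal_get_introvert_seat : Prop := ∀ (seats : List Int), Dom_get_introvert_seat seats → Pre_get_introvert_seat seats → Spec_get_introvert_seat seats (get_introvert_seat seats)

-- ===== LEMMAS AND PROOFS =====

-- ---- generic helpers describing B's sweeps ----

-- B's sweep written as a plain recursion (optional "distance since the last 1")
def pvScanO (d : Option Int) : List Int → List (Option Int)
  | [] => []
  | s :: t => let d' := if s = 1 then some (0:Int)
                        else (match d with | none => none | some x => some (x + 1))
              d' :: pvScanO d' t

-- the running distance after a whole block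
def pvEndO (d : Option Int) : List Int → Option Int
  | [] => d
  | s :: t => pvEndO (if s = 1 then some 0
                      else (match d with | none => none | some x => some (x + 1))) t

-- B's sweep after a 1 has been seen, over the integers
def pvScan (d : Int) : List Int → List Int
  | [] => []
  | s :: t => let d' := if s = 1 then 0 else d + 1
              d' :: pvScan d' t

def pvAsc (d : Int) : Nat → List Int
  | 0 => []
  | k + 1 => (d + 1) :: pvAsc (d + 1) k

def pvDesc : Nat → List Int
  | 0 => []
  | k + 1 => ((k : Int) + 1) :: pvDesc k

-- B's per-pair combination: min of the distances that exist
def pvComb (lr : Option Int × Option Int) : Int :=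
  match ([lr.1, lr.2].filterMap id : List Int) with
  | [] => 0
  | x :: xs => xs.foldl min x

def pvMinsO (l r : List (Option Int)) : List Int := (l.zip r).map pvComb

def pvMins (l r : List Int) : List Int := (l.zip r).map (fun p => min p.1 p.2)

def pvRightO (t : List Int) : List (Option Int) := (pvScanO none t.reverse).reverse

-- A's loop, per element, once indices are replaced by "distance since the last 1".
def pvStepG (st : Int × Int) (s : Int) : Int × Int :=
  if s = 1 then (1, max st.2 (PySem.Int.floordiv st.1 2)) else (st.1 + 1, st.2)

-- A's loop, per enumerated element.
def pvStepE (s : Option Int × Int) (p : Int × Int) : Option Int × Int :=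
  if p.2 = 1 then
    match s.1 with
    | none => (some p.1, p.1)
    | some q => (some p.1, max s.2 (PySem.Int.floordiv (p.1 - q) 2))
  else s

theorem pvSweep_eq (seats : List Int) (d : Option Int) (acc : List (Option Int)) :
    (seats.foldl (fun (st : Option Int × List (Option Int)) (s : Int) =>
      let d' := if s = 1 then some (0:Int)
                else (match st.1 with | none => none | some x => some (x + 1))
      (d', st.2 ++ [d'])) (d, acc)).2 = acc ++ pvScanO d seats := by
  induction seats generalizing d acc with
  | nil => simp [pvScanO]
  | cons s t ih => simp [pvScanO, ih]

theorem pvScanO_some (x : Int) (l : List Int) :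
    pvScanO (some x) l = (pvScan x l).map some := by
  induction l generalizing x with
  | nil => rfl
  | cons s t ih =>
      by_cases hs : s = 1 <;> simp [pvScanO, pvScan, hs, ih]

theorem pvScan_length (d : Int) (l : List Int) : (pvScan d l).length = l.length := by
  induction l generalizing d with
  | nil => rfl
  | cons s t ih => simp [pvScan, ih]

theorem pvAsc_length (d : Int) (k : Nat) : (pvAsc d k).length = k := by
  induction k generalizing d with
  | zero => rfl
  | succ k ih => simp [pvAsc, ih]

theorem pvDesc_length (k : Nat) : (pvDesc k).length = k := by
  induction k with
  | zero => rfl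
  | succ k ih => simp [pvDesc, ih]

theorem pvScanO_append (d : Option Int) (xs ys : List Int) :
    pvScanO d (xs ++ ys) = pvScanO d xs ++ pvScanO (pvEndO d xs) ys := by
  induction xs generalizing d with
  | nil => simp [pvScanO, pvEndO]
  | cons s t ih => simp [pvScanO, pvEndO, ih]

theorem pvScanO_noOne (z : List Int) (h : ∀ x ∈ z, x ≠ 1) :
    pvScanO none z = List.replicate z.length none ∧ pvEndO none z = none := by
  induction z with
  | nil => simp [pvScanO, pvEndO]
  | cons s t ih =>
      have hs : s ≠ 1 := h s (by simp)
      have := ih (fun x hx => h x (by simp [hx]))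
      simp [pvScanO, pvEndO, hs, this.1, this.2, List.replicate_succ]

theorem pvScan_noOne (z : List Int) (d : Int) (h : ∀ x ∈ z, x ≠ 1) :
    pvScan d z = pvAsc d z.length := by
  induction z generalizing d with
  | nil => simp [pvScan, pvAsc]
  | cons s t ih =>
      have hs : s ≠ 1 := h s (by simp)
      simp [pvScan, pvAsc, hs, ih (d + 1) (fun x hx => h x (by simp [hx]))]

theorem pvAsc_snoc (d : Int) (k : Nat) :
    pvAsc d (k + 1) = pvAsc d k ++ [d + k + 1] := by
  induction k generalizing d with
  | zero => simp [pvAsc]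
  | succ k ih =>
      show (d + 1) :: pvAsc (d + 1) (k + 1) = ((d + 1) :: pvAsc (d + 1) k) ++ _
      rw [ih (d + 1)]
      simp
      ring

theorem pvAsc_reverse (k : Nat) : (pvAsc 0 k).reverse = pvDesc k := by
  induction k with
  | zero => rfl
  | succ k ih => rw [pvAsc_snoc]; simp [pvDesc, ih]

theorem pvComb_some_some (x y : Int) : pvComb (some x, some y) = min x y := rfl
theorem pvMinsO_append (x1 y1 x2 y2 : List (Option Int)) (h : x1.length = y1.length) :
    pvMinsO (x1 ++ x2) (y1 ++ y2) = pvMinsO x1 y1 ++ pvMinsO x2 y2 := by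
  unfold pvMinsO
  rw [List.zip_append h, List.map_append]

theorem pvMinsO_cons (x y : Option Int) (xs ys : List (Option Int)) :
    pvMinsO (x :: xs) (y :: ys) = pvComb (x, y) :: pvMinsO xs ys := rfl

theorem pvMinsO_some_some (xs ys : List Int) :
    pvMinsO (xs.map some) (ys.map some) = pvMins xs ys := by
  induction xs generalizing ys with
  | nil => simp [pvMinsO, pvMins]
  | cons x xs ih =>
      cases ys with
      | nil => simp [pvMinsO, pvMins]
      | cons y ys =>
          simp only [List.map_cons, pvMinsO, pvMins, List.zip_cons_cons, List.map_cons] at ih ⊢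
          rw [show pvComb (some x, some y) = min x y from rfl]
          exact congrArg _ (ih ys)

-- left distances exist, right side is "nobody": the left distances survive
theorem pvMinsO_some_none (xs : List Int) (n : Nat) (h : xs.length = n) :
    pvMinsO (xs.map some) (List.replicate n none) = xs := by
  induction xs generalizing n with
  | nil => simp [pvMinsO]
  | cons x xs ih =>
      cases n with
      | zero => simp at h
      | succ n =>
          simp only [List.map_cons, List.replicate_succ, pvMinsO, List.zip_cons_cons,
            List.map_cons] at ih ⊢
          rw [show pvComb (some x, none) = x from rfl]
          exact congrArg _ (ih n (by simpa using h))

-- left side is "nobody yet", right distances exist: the right distances survive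
theorem pvMinsO_none_some (n : Nat) (ys : List Int) (h : ys.length = n) :
    pvMinsO (List.replicate n none) (ys.map some) = ys := by
  induction ys generalizing n with
  | nil => simp [pvMinsO]
  | cons y ys ih =>
      cases n with
      | zero => simp at h
      | succ n =>
          simp only [List.map_cons, List.replicate_succ, pvMinsO, List.zip_cons_cons,
            List.map_cons] at ih ⊢
          rw [show pvComb (none, some y) = y from rfl]
          exact congrArg _ (ih n (by simpa using h))

theorem pvFoldMax_shift (t : List Int) (x r : Int) :
    t.foldl max (max x r) = max x (t.foldl max r) := by
  induction t generalizing r with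
  | nil => rfl
  | cons a t ih =>
      simp only [List.foldl_cons]
      rw [max_assoc, ih]

theorem pvFoldMax_le (t : List Int) (r c : Int) (hrc : r ≤ c) (h : ∀ y ∈ t, y ≤ c) :
    t.foldl max r ≤ c := by
  induction t generalizing r with
  | nil => exact hrc
  | cons a t ih =>
      exact ih (max r a) (max_le hrc (h a (by simp))) (fun y hy => h y (by simp [hy]))

theorem pvFoldMax_desc (a : Nat) (r : Int) (hr : 0 ≤ r) :
    (pvDesc a).foldl max r = max r a := by
  induction a generalizing r with
  | zero => simp [pvDesc]; omega
  | succ a ih =>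
      simp only [pvDesc, List.foldl_cons]
      rw [ih (max r ((a:Int)+1)) (by omega)]
      push_cast; omega

theorem pvFoldMax_asc (k : Nat) (d r : Int) (hk : 1 ≤ k) :
    (pvAsc d k).foldl max r = max r (d + k) := by
  induction k generalizing d r with
  | zero => omega
  | succ k ih =>
      simp only [pvAsc, List.foldl_cons]
      rcases Nat.eq_zero_or_pos k with hk0 | hk0
      · subst hk0; simp [pvAsc]
      · rw [ih (d+1) _ hk0]
        push_cast; omega

theorem pvGapMins_mem (d : Int) (a : Nat) (x : Int) :
    x ∈ pvMins (pvAsc d a) (pvDesc a) ↔ ∃ i : Nat, i < a ∧ x = min (d + i + 1) ((a:Int) - i) := by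
  induction a generalizing d with
  | zero => simp [pvAsc, pvDesc, pvMins]
  | succ a ih =>
      simp only [pvAsc, pvDesc, pvMins, List.zip_cons_cons, List.map_cons, List.mem_cons] at ih ⊢
      constructor
      · rintro (h | h)
        · exact ⟨0, by omega, by push_cast; simpa using h⟩
        · obtain ⟨i, hi, hx⟩ := (ih (d+1)).mp h
          exact ⟨i + 1, by omega, by push_cast at hx ⊢; omega⟩
      · rintro ⟨i, hi, hx⟩
        cases i with
        | zero => left; push_cast at hx; simpa using hx
        | succ i =>
            right
            exact (ih (d+1)).mpr ⟨i, by omega, by push_cast at hx ⊢; omega⟩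

theorem pvGapFold (a : Nat) (ha : 1 ≤ a) (r : Int) (_hr : 0 ≤ r) :
    (pvMins (pvAsc 0 a) (pvDesc a)).foldl max r = max r (PySem.Int.floordiv ((a:Int) + 1) 2) := by
  have hfd : PySem.Int.floordiv ((a:Int) + 1) 2 = ((a:Int) + 1) / 2 :=
    PySem.Int.floordiv_eq_ediv_of_pos (by omega)
  rw [hfd]
  apply le_antisymm
  · apply pvFoldMax_le
    · have : (1:Int) ≤ ((a:Int)+1)/2 := by omega
      omega
    · intro y hy
      obtain ⟨i, hi, hx⟩ := (pvGapMins_mem 0 a y).mp hy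
      have hi' : (i : Int) < a := by exact_mod_cast hi
      simp only [zero_add] at hx
      have : y ≤ ((a:Int)+1)/2 := by
        rcases min_choice ((i:Int) + 1) ((a:Int) - i) with h | h <;> rw [h] at hx <;> omega
      omega
  · have hmem : min ((0:Int) + ((a-1)/2 : Nat) + 1) ((a:Int) - ((a-1)/2 : Nat))
        ∈ pvMins (pvAsc 0 a) (pvDesc a) :=
      (pvGapMins_mem 0 a _).mpr ⟨(a-1)/2, by omega, rfl⟩
    have hval : min ((0:Int) + ((a-1)/2 : Nat) + 1) ((a:Int) - ((a-1)/2 : Nat))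
        = ((a:Int)+1)/2 := by
      have h1 : (((a-1)/2 : Nat) : Int) = ((a:Int)-1)/2 := by
        push_cast [Int.natCast_div]; omega
      rw [h1]; omega
    have h2 := (PySem.List.le_foldl_max (pvMins (pvAsc 0 a) (pvDesc a)) r).2 _ hmem
    rw [hval] at h2
    exact max_le ((PySem.List.le_foldl_max _ r).1) h2

theorem pvStepG_noOne (t : List Int) (g r : Int) (h : ∀ x ∈ t, x ≠ 1) :
    t.foldl pvStepG (g, r) = (g + t.length, r) := by
  induction t generalizing g with
  | nil => simp
  | cons s t ih =>
      have hs : s ≠ 1 := h s (by simp)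
      simp only [List.foldl_cons, pvStepG, hs, if_false]
      rw [ih (g+1) (fun x hx => h x (by simp [hx]))]
      simp
      ring

theorem pvStepG_shift (t : List Int) (g x r : Int) :
    t.foldl pvStepG (g, max x r) = ((t.foldl pvStepG (g, r)).1, max x (t.foldl pvStepG (g, r)).2) := by
  induction t generalizing g r with
  | nil => rfl
  | cons s t ih =>
      simp only [List.foldl_cons, pvStepG]
      by_cases hs : s = 1
      · simp only [hs, if_true]
        rw [max_assoc, ih]
      · simp only [hs, if_false]
        exact ih (g+1) r

-- the running integer distance after a whole block
def pvEnd (d : Int) : List Int → Int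
  | [] => d
  | s :: t => pvEnd (if s = 1 then 0 else d + 1) t

theorem pvScan_append (d : Int) (xs ys : List Int) :
    pvScan d (xs ++ ys) = pvScan d xs ++ pvScan (pvEnd d xs) ys := by
  induction xs generalizing d with
  | nil => simp [pvScan, pvEnd]
  | cons s t ih => simp [pvScan, pvEnd, ih]

-- split a list at the first occurrence of 1
theorem pvSplit (l : List Int) (h : (1:Int) ∈ l) :
    ∃ z t, l = z ++ 1 :: t ∧ ∀ x ∈ z, x ≠ 1 := by
  induction l with
  | nil => simp at h
  | cons s l ih =>
      by_cases hs : s = 1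
      · exact ⟨[], l, by simp [hs], by simp⟩
      · have hl : (1:Int) ∈ l := by
          rcases List.mem_cons.mp h with h1 | h1
          · exact absurd h1.symm hs
          · exact h1
        obtain ⟨z, t, hzt, hz⟩ := ih hl
        exact ⟨s :: z, t, by simp [hzt], by
          intro x hx
          rcases List.mem_cons.mp hx with h1 | h1
          · simpa [h1] using hs
          · exact hz x h1⟩

-- the heart: B's "max of pointwise min of the two sweeps" on the part after the first 1
-- equals A's gap recursion there
theorem pvMain (N : Nat) : ∀ (t : List Int), t.length ≤ N →
    (pvMinsO ((pvScan 0 t).map some) (pvRightO t)).foldl max 0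
      = max (t.foldl pvStepG (1, 0)).2 ((t.foldl pvStepG (1, 0)).1 - 1) := by
  induction N with
  | zero =>
      intro t ht
      have : t = [] := List.length_eq_zero_iff.mp (Nat.le_zero.mp ht)
      subst this
      simp [pvScan, pvRightO, pvScanO, pvMinsO]
  | succ N ih =>
      intro t ht
      by_cases h1 : (1:Int) ∈ t
      · obtain ⟨z, t', rfl, hz⟩ := pvSplit t h1
        have hzrev : ∀ x ∈ z.reverse, x ≠ 1 := fun x hx => hz x (List.mem_reverse.mp hx)
        have ht' : t'.length ≤ N := by simp at ht; omega
        have hIH := ih t' ht'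
        -- decompose both sweeps
        have hleft : pvScan 0 (z ++ 1 :: t') = pvAsc 0 z.length ++ 0 :: pvScan 0 t' := by
          rw [pvScan_append, pvScan_noOne z 0 hz]
          rw [show pvScan (pvEnd 0 z) (1 :: t') = 0 :: pvScan 0 t' from by simp [pvScan]]
        have hright : pvRightO (z ++ 1 :: t')
            = (pvDesc z.length).map some ++ some 0 :: pvRightO t' := by
          unfold pvRightO
          rw [show (z ++ 1 :: t').reverse = t'.reverse ++ 1 :: z.reverse from by simp]
          rw [pvScanO_append]
          rw [show ∀ d, pvScanO d (1 :: z.reverse) = some 0 :: pvScanO (some 0) z.reverse from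
            fun d => by simp [pvScanO]]
          rw [pvScanO_some, pvScan_noOne z.reverse 0 hzrev]
          simp [← pvAsc_reverse, ← List.map_reverse]
        rw [hleft, hright, List.map_append,
          pvMinsO_append _ _ _ _ (by rw [List.length_map, List.length_map, pvAsc_length, pvDesc_length])]
        rw [show (0 :: pvScan 0 t').map some = some 0 :: (pvScan 0 t').map some from rfl,
          pvMinsO_cons, pvMinsO_some_some, pvComb_some_some]
        rw [show min (0:Int) 0 = 0 from rfl]
        rw [List.foldl_append, List.foldl_cons]
        -- the A-side fold
        rw [List.foldl_append, pvStepG_noOne z 1 0 hz, List.foldl_cons]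
        rw [show pvStepG (1 + (z.length:Int), 0) 1
            = (1, max 0 (PySem.Int.floordiv (1 + (z.length:Int)) 2)) from by simp [pvStepG]]
        rcases Nat.eq_zero_or_pos z.length with ha | ha
        · -- no gap in front of the 1
          rw [List.length_eq_zero_iff.mp ha]
          simp only [List.length_nil, Nat.cast_zero, pvAsc, pvDesc, pvMins, List.map_nil,
            pvMinsO, List.zip_nil_left, List.foldl_nil, max_self]
          rw [show PySem.Int.floordiv (1 + (0:Int)) 2 = 0 from by decide, max_self]
          exact hIH
        · -- a nonempty gap in front of the 1
          have hGap := pvGapFold z.length ha 0 le_rfl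
          rw [hGap]
          set v := PySem.Int.floordiv ((z.length:Int) + 1) 2 with hv
          have hv1 : 1 ≤ v := by
            rw [hv, PySem.Int.floordiv_eq_ediv_of_pos (by omega)]
            omega
          rw [show PySem.Int.floordiv (1 + (z.length:Int)) 2 = v from by rw [hv]; ring_nf]
          rw [show max (max (0:Int) v) 0 = max v 0 from by omega]
          rw [pvFoldMax_shift]
          rw [show max (0:Int) v = max v 0 from by omega]
          rw [pvStepG_shift]
          rw [hIH]
          omega
      · -- no 1 at all in t: the right sweep reports "nobody" everywhere
        rw [show pvRightO t = List.replicate t.length none from by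
          unfold pvRightO
          rw [(pvScanO_noOne t.reverse (fun x hx h => h1 (h ▸ List.mem_reverse.mp hx))).1]
          simp]
        rw [pvMinsO_some_none _ _ (pvScan_length 0 t)]
        rw [pvScan_noOne t 0 (fun x hx h => h1 (h ▸ hx))]
        rw [pvStepG_noOne t 1 0 (fun x hx h => h1 (h ▸ hx))]
        rcases Nat.eq_zero_or_pos t.length with h0 | h0
        · rw [List.length_eq_zero_iff.mp h0]
          simp [pvAsc]
        · rw [pvFoldMax_asc t.length 0 0 h0]
          push_cast
          omega

-- A's index-based loop is the fold of pvStepE over the enumerated list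
theorem pvAfold (seats : List Int) :
    (PySem.List.pyRange 0 (seats.length : Int) 1).foldl
      (fun (s : Option Int × Int) i =>
        if PySem.List.pyGetD seats i 0 = 1 then
          match s.1 with
          | none => (some i, i)
          | some p => (some i, max s.2 (PySem.Int.floordiv (i - p) 2))
        else s) (none, -1)
      = (PySem.List.enumerate seats 0).foldl pvStepE (none, -1) := by
  rw [PySem.List.enumerate_eq_map_pyRange (d := 0), List.foldl_map]
  rfl

theorem pvE_noOne (z : List Int) (hz : ∀ x ∈ z, x ≠ 1) :
    ∀ (k r : Int), (PySem.List.enumerate z k).foldl pvStepE (none, r) = (none, r) := by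
  induction z with
  | nil => intro k r; simp [PySem.List.enumerate_nil]
  | cons s t ih =>
      intro k r
      have hs : s ≠ 1 := hz s (by simp)
      rw [PySem.List.enumerate_cons, List.foldl_cons]
      rw [show pvStepE (none, r) (k, s) = (none, r) from by simp [pvStepE, hs]]
      exact ih (fun x hx => hz x (by simp [hx])) (k+1) r

-- correspondence between A's enumerated loop and the index-free gap loop
theorem pvE_corr (t : List Int) : ∀ (k p r : Int),
    (PySem.List.enumerate t k).foldl pvStepE (some p, r)
      = (some (k + t.length - (t.foldl pvStepG (k - p, r)).1), (t.foldl pvStepG (k - p, r)).2) := by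
  induction t with
  | nil => intro k p r; simp
  | cons s t ih =>
      intro k p r
      rw [PySem.List.enumerate_cons, List.foldl_cons, List.foldl_cons]
      by_cases hs : s = 1
      · subst hs
        rw [show pvStepE (some p, r) (k, 1)
            = (some k, max r (PySem.Int.floordiv (k - p) 2)) from by simp [pvStepE]]
        rw [show pvStepG (k - p, r) 1
            = (1, max r (PySem.Int.floordiv (k - p) 2)) from by simp [pvStepG]]
        rw [ih (k+1) k (max r (PySem.Int.floordiv (k - p) 2))]
        rw [show k + 1 - k = (1:Int) from by ring]
        simp only [List.length_cons, Nat.cast_add, Nat.cast_one, Prod.mk.injEq, Option.some.injEq]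
        exact ⟨by ring, trivial⟩
      · rw [show pvStepE (some p, r) (k, s) = (some p, r) from by simp [pvStepE, hs]]
        rw [show pvStepG (k - p, r) s = (k - p + 1, r) from by simp [pvStepG, hs]]
        rw [ih (k+1) p r]
        rw [show k + 1 - p = k - p + 1 from by ring]
        simp only [List.length_cons, Nat.cast_add, Nat.cast_one, Prod.mk.injEq, Option.some.injEq]
        exact ⟨by ring, trivial⟩

-- the whole equivalence on inputs containing a 1
theorem pvEquiv (seats : List Int) (h : (1:Int) ∈ seats) :
    get_introvert_seat seats = get_introvert_seat_alt seats := by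
  obtain ⟨z, t, rfl, hz⟩ := pvSplit seats h
  have hzrev : ∀ x ∈ z.reverse, x ≠ 1 := fun x hx => hz x (List.mem_reverse.mp hx)
  have hn : (((z ++ 1 :: t).length : Nat) : Int) = (z.length : Int) + 1 + t.length := by
    simp; ring
  -- A's side
  have hA : get_introvert_seat (z ++ 1 :: t)
      = max (t.foldl pvStepG (1, (z.length : Int))).2
            ((t.foldl pvStepG (1, (z.length : Int))).1 - 1) := by
    simp only [get_introvert_seat, pvAfold, PySem.List.enumerate_append, List.foldl_append,
      pvE_noOne z hz, PySem.List.enumerate_cons, List.foldl_cons]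
    rw [show pvStepE (none, -1) ((0 : Int) + (z.length:Int), 1)
        = (some ((z.length:Int)), (z.length:Int)) from by simp [pvStepE]]
    rw [show (0:Int) + (z.length:Int) + 1 = (z.length:Int) + 1 from by ring]
    rw [pvE_corr t ((z.length:Int) + 1) (z.length:Int) (z.length:Int)]
    rw [show (z.length:Int) + 1 - (z.length:Int) = 1 from by ring]
    rw [hn]
    push_cast
    omega
  -- B's side
  have hleft : pvScanO none (z ++ 1 :: t)
      = List.replicate z.length none ++ some 0 :: (pvScan 0 t).map some := by
    rw [pvScanO_append, (pvScanO_noOne z hz).1, (pvScanO_noOne z hz).2]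
    rw [show pvScanO none (1 :: t) = some 0 :: pvScanO (some 0) t from by simp [pvScanO]]
    rw [pvScanO_some]
  have hright : (pvScanO none (z ++ 1 :: t).reverse).reverse
      = (pvDesc z.length).map some ++ some 0 :: pvRightO t := by
    rw [show (z ++ 1 :: t).reverse = t.reverse ++ 1 :: z.reverse from by simp]
    rw [pvScanO_append]
    rw [show ∀ d, pvScanO d (1 :: z.reverse) = some 0 :: pvScanO (some 0) z.reverse from
      fun d => by simp [pvScanO]]
    rw [pvScanO_some, pvScan_noOne z.reverse 0 hzrev]
    simp [← pvAsc_reverse, ← List.map_reverse, pvRightO]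
  have hB : get_introvert_seat_alt (z ++ 1 :: t)
      = match pvDesc z.length ++ 0 :: pvMinsO ((pvScan 0 t).map some) (pvRightO t) with
        | [] => (0:Int)
        | x :: xs => xs.foldl max x := by
    simp only [get_introvert_seat_alt, pvSweep_eq, List.nil_append]
    rw [hleft, hright]
    rw [show ∀ (l r : List (Option Int)), (l.zip r).map (fun lr =>
        match ([lr.1, lr.2].filterMap id : List Int) with
        | [] => (0:Int)
        | x :: xs => xs.foldl min x) = pvMinsO l r from fun l r => rfl]
    rw [pvMinsO_append _ _ _ _ (by
      rw [List.length_replicate, List.length_map, pvDesc_length])]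
    rw [pvMinsO_none_some _ _ (pvDesc_length z.length), pvMinsO_cons, pvComb_some_some]
    rfl
  set T := pvMinsO ((pvScan 0 t).map some) (pvRightO t) with hT
  have hM := pvMain t.length t le_rfl
  rw [← hT] at hM
  have hT0 : (0:Int) ≤ T.foldl max 0 := (PySem.List.le_foldl_max T 0).1
  rw [hA, hB]
  rw [show ((z.length : Nat) : Int) = max ((z.length : Nat) : Int) 0 from by omega, pvStepG_shift]
  rcases Nat.eq_zero_or_pos z.length with ha | ha
  · rw [List.length_eq_zero_iff.mp ha]
    rw [show (pvDesc ([] : List Int).length) = ([] : List Int) from rfl, List.nil_append]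
    rw [show (match (0 :: T : List Int) with
        | [] => (0:Int)
        | x :: xs => xs.foldl max x) = T.foldl max 0 from rfl]
    simp only [List.length_nil, Nat.cast_zero]
    omega
  · obtain ⟨a', ha'⟩ : ∃ a', z.length = a' + 1 := ⟨z.length - 1, by omega⟩
    rw [ha']
    rw [show pvDesc (a' + 1) = ((a' : Int) + 1) :: pvDesc a' from rfl, List.cons_append]
    rw [show (match (((a' : Int) + 1) :: (pvDesc a' ++ 0 :: T) : List Int) with
        | [] => (0:Int)
        | x :: xs => xs.foldl max x) = (pvDesc a' ++ 0 :: T).foldl max ((a' : Int) + 1) from rfl]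
    rw [List.foldl_append, pvFoldMax_desc a' ((a' : Int) + 1) (by omega), List.foldl_cons]
    rw [show max (max ((a' : Int) + 1) (a' : Int)) 0 = max ((a' : Int) + 1) 0 from by omega]
    rw [pvFoldMax_shift]
    push_cast
    omega

-- ===== VERDICT (by name: the statement is the Claim_ definition above) =====
theorem get_introvert_seat_spec : Claim_equal_get_introvert_seat := by
  intro seats _ hpre
  exact pvEquiv seats hpre
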